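-- pv_equiv track=rewrite | github.com/emotionalcode/megaphone-textmining | megaphone_tokenizer/tokenswapper.py | recover_placeholders
-- ===== SOURCE A (Python) =====
-- PLACEHOLDER = "ItemNamePlaceHolder"
--
-- POS_TAG_ITEM_NAME = 'ItemName'
--
-- def recover_placeholders(tokens, placeHolderDic):
--     """re-swap placeholders to item name.
--
--     Returns: recovered tokens
--     """
--     recoveredTokens = []
--     for i, token in enumerate(tokens):
--         if i > 0 and tokens[i-1][0] == PLACEHOLDER:
--             continue
--         if token[0] == PLACEHOLDER and i+1 < len(tokens):
--             sequenceOfPlaceHolder = int(tokens[i + 1][0]) #next token is placeholder's seq number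
--             recoveredTokens.append((placeHolderDic[sequenceOfPlaceHolder], POS_TAG_ITEM_NAME))
--         else:
--             recoveredTokens.append(tokens[i])
--     return recoveredTokens
-- ===== SOURCE B (Python) =====
-- PLACEHOLDER = "ItemNamePlaceHolder"
--
-- POS_TAG_ITEM_NAME = 'ItemName'
--
-- def recover_placeholders(tokens, placeHolderDic):
--     """re-swap placeholders to item name (pair-consuming index loop)."""
--     out = []
--     i = 0
--     n = len(tokens)
--     while i < n:
--         tok = tokens[i]
--         if tok[0] == PLACEHOLDER and i + 1 < n:
--             out.append((placeHolderDic[int(tokens[i + 1][0])], POS_TAG_ITEM_NAME))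
--             i += 2
--         else:
--             out.append(tok)
--             i += 1
--     return out
-- ===== Notes on version B (the rewrite author's own statement) =====
-- stated objective: alternative
-- what changed: Replaced the enumerate loop with a look-behind skip ('previous token was the placeholder, continue') by an index while-loop that consumes each placeholder + sequence-number pair as a unit (i += 2), dropping the tokens[i-1] back-reference and the continue.
import Mathlib
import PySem

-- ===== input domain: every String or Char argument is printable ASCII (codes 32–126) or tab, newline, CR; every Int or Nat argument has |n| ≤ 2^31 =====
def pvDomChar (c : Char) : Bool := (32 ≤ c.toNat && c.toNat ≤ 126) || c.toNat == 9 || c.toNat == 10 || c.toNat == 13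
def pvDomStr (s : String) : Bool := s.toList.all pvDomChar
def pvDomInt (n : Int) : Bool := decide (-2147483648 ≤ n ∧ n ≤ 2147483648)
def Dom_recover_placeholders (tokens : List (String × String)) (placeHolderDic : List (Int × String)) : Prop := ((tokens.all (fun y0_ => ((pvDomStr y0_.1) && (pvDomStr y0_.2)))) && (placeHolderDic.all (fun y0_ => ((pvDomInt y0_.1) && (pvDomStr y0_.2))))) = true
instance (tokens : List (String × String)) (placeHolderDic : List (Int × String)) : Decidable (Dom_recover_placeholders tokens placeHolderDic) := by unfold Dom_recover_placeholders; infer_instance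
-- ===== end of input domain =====

-- B re-decomposes A's enumerate-with-look-behind-skip loop as a pair-consuming index loop; same values, same cost.

def pvPLACEHOLDER : String := "ItemNamePlaceHolder"

def pvPOS_TAG_ITEM_NAME : String := "ItemName"

-- ===== PORT A =====
-- the for-loop over enumerate(tokens), carrying the Option acc (none = raised)
def pvLoopA (tokens : List (String × String)) (placeHolderDic : List (Int × String)) :
    List (Int × (String × String)) → Option (List (String × String)) → Option (List (String × String))
  | [], acc => acc
  | (i, token) :: rest, acc =>
      pvLoopA tokens placeHolderDic rest
        (acc.bind (fun recovered =>
          if i > 0 ∧ (PySem.List.pyGet? tokens (i - 1)).map Prod.fst = some pvPLACEHOLDER then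
            some recovered  -- continue
          else if token.1 = pvPLACEHOLDER ∧ i + 1 < (tokens.length : Int) then
            -- none = IndexError / ValueError / KeyError
            ((PySem.List.pyGet? tokens (i + 1)).bind (fun t => PySem.Int.ofStr? t.1)).bind (fun seq =>
              (List.lookup seq placeHolderDic).map (fun name => recovered ++ [(name, pvPOS_TAG_ITEM_NAME)]))
          else
            some (recovered ++ [token])))

def recover_placeholders (tokens : List (String × String)) (placeHolderDic : List (Int × String)) : List (String × String) :=
  (pvLoopA tokens placeHolderDic (PySem.List.enumerate tokens) (some [])).getD []

-- ===== PORT B =====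
-- the while-loop 'while i < n' of Source B, recursion on the index i (none = raised)
def pvLoopB (tokens : List (String × String)) (placeHolderDic : List (Int × String)) (i : Nat) :
    Option (List (String × String)) :=
  if h : i < tokens.length then
    let tok := tokens[i]
    if tok.1 = pvPLACEHOLDER ∧ i + 1 < tokens.length then
      ((PySem.List.pyGet? tokens ((i : Int) + 1)).bind (fun t => PySem.Int.ofStr? t.1)).bind (fun seq =>
        (List.lookup seq placeHolderDic).bind (fun name =>
          (pvLoopB tokens placeHolderDic (i + 2)).map (fun out => (name, pvPOS_TAG_ITEM_NAME) :: out)))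
    else
      (pvLoopB tokens placeHolderDic (i + 1)).map (fun out => tok :: out)
  else
    some []
termination_by tokens.length - i

def recover_placeholders_alt (tokens : List (String × String)) (placeHolderDic : List (Int × String)) : List (String × String) :=
  (pvLoopB tokens placeHolderDic 0).getD []

-- ===== PRECONDITION & SPEC =====
-- Pre_ excludes exactly the inputs on which A raises (ValueError from int(), KeyError from the dict,
-- both reached from a placeholder token followed by another token): for every placeholder token that
-- is not the last token, the next token's word must parse as an int that is a key of placeHolderDic.
def Pre_recover_placeholders (tokens : List (String × String)) (placeHolderDic : List (Int × String)) : Prop :=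
  ∀ i < tokens.length, ∀ (h : i < tokens.length),
    (tokens[i]'h).1 = pvPLACEHOLDER → ∀ (h1 : i + 1 < tokens.length),
      (((PySem.Int.ofStr? ((tokens[i+1]'h1).1)).bind (fun seq => List.lookup seq placeHolderDic)).isSome = true)

instance (tokens : List (String × String)) (placeHolderDic : List (Int × String)) : Decidable (Pre_recover_placeholders tokens placeHolderDic) := by unfold Pre_recover_placeholders; infer_instance

def pvWitness_recover_placeholders : (List (String × String)) × (List (Int × String)) :=
  ([("ItemNamePlaceHolder", "NN"), ("2", "CD"), ("runs", "VB")], [(2, "coffee maker")])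

def Spec_recover_placeholders (tokens : List (String × String)) (placeHolderDic : List (Int × String)) (out : List (String × String)) : Prop := out = recover_placeholders_alt tokens placeHolderDic
instance (tokens : List (String × String)) (placeHolderDic : List (Int × String)) (out : List (String × String)) : Decidable (Spec_recover_placeholders tokens placeHolderDic out) := by unfold Spec_recover_placeholders; infer_instance

-- ===== CLAIM (what is proved, stated in full; the proofs are below) =====
def Claim_equal_recover_placeholders : Prop := ∀ (tokens : List (String × String)) (placeHolderDic : List (Int × String)), Dom_recover_placeholders tokens placeHolderDic → Pre_recover_placeholders tokens placeHolderDic → Spec_recover_placeholders tokens placeHolderDic (recover_placeholders tokens placeHolderDic)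

-- ===== LEMMAS AND PROOFS =====

theorem pvOfStr_placeholder : PySem.Int.ofStr? pvPLACEHOLDER = none := by decide

theorem pvLoopAB (tokens : List (String × String)) (placeHolderDic : List (Int × String))
    (pre : Pre_recover_placeholders tokens placeHolderDic) :
    ∀ k i, tokens.length - i = k → i ≤ tokens.length →
    (i = 0 ∨ tokens.length ≤ i ∨ ∃ h : i - 1 < tokens.length, (tokens[i-1]'h).1 ≠ pvPLACEHOLDER) →
    ∀ acc, pvLoopA tokens placeHolderDic (PySem.List.enumerate (tokens.drop i) (i : Int)) (some acc)
      = (pvLoopB tokens placeHolderDic i).map (fun out => acc ++ out) := by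
  intro k
  induction k using Nat.strong_induction_on with
  | _ k IH =>
    intro i hk hle hok acc
    by_cases hin : i < tokens.length
    · -- tokens[i] exists
      have hdrop : tokens.drop i = tokens[i] :: tokens.drop (i+1) :=
        List.drop_eq_getElem_cons hin
      rw [hdrop, PySem.List.enumerate_cons, pvLoopA]
      simp only [Option.bind_some]
      -- the look-behind skip condition is false here
      have hskip : ¬ ((i : Int) > 0 ∧ (PySem.List.pyGet? tokens ((i : Int) - 1)).map Prod.fst = some pvPLACEHOLDER) := by
        rcases hok with h0 | hge | ⟨hm, hne⟩
        · subst h0; simp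
        · omega
        · rintro ⟨hpos, hprev⟩
          have hi1 : (1:Int) ≤ (i : Int) := hpos
          have hi0 : 0 < i := by exact_mod_cast hpos
          have : (i : Int) - 1 = ((i - 1 : Nat) : Int) := by omega
          rw [this, PySem.List.pyGet?_natCast] at hprev
          rw [List.getElem?_eq_getElem hm] at hprev
          simp at hprev
          exact hne hprev
      rw [if_neg hskip]
      by_cases hbr : tokens[i].1 = pvPLACEHOLDER ∧ i + 1 < tokens.length
      · -- placeholder branch
        obtain ⟨hP, hnext⟩ := hbr
        have hbrI : tokens[i].1 = pvPLACEHOLDER ∧ (i : Int) + 1 < (tokens.length : Int) := by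
          exact ⟨hP, by exact_mod_cast hnext⟩
        rw [if_pos hbrI]
        have hget : PySem.List.pyGet? tokens ((i : Int) + 1) = some (tokens[i+1]'hnext) := by
          have : (i : Int) + 1 = ((i + 1 : Nat) : Int) := by omega
          rw [this, PySem.List.pyGet?_natCast, List.getElem?_eq_getElem hnext]
        have hpre := pre i hin hin hP hnext
        rcases hseq : PySem.Int.ofStr? ((tokens[i+1]'hnext).1) with _ | seq
        · rw [hseq] at hpre; simp at hpre
        rcases hname : List.lookup seq placeHolderDic with _ | name
        · rw [hseq] at hpre; simp only [Option.bind_some] at hpre; rw [hname] at hpre; simp at hpre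
        rw [hget]
        simp only [Option.bind_some, hseq, hname, Option.map_some]
        -- A's next iteration (index i+1) is skipped
        have hin1 : i + 1 < tokens.length := hnext
        have hdrop1 : tokens.drop (i+1) = (tokens[i+1]'hin1) :: tokens.drop (i+2) :=
          List.drop_eq_getElem_cons hin1
        rw [hdrop1, PySem.List.enumerate_cons, pvLoopA]
        simp only [Option.bind_some]
        have hskip1 : ((i : Int) + 1 > 0 ∧ (PySem.List.pyGet? tokens ((i : Int) + 1 - 1)).map Prod.fst = some pvPLACEHOLDER) := by
          constructor
          · omega
          · have : (i : Int) + 1 - 1 = ((i : Nat) : Int) := by omega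
            rw [this, PySem.List.pyGet?_natCast, List.getElem?_eq_getElem hin]
            simp [hP]
        rw [if_pos hskip1]
        -- tokens[i+1] is a number token, hence not the placeholder
        have hne1 : (tokens[i+1]'hin1).1 ≠ pvPLACEHOLDER := by
          intro hcon
          rw [hcon, pvOfStr_placeholder] at hseq
          cases hseq
        have hrec := IH (tokens.length - (i+2)) (by omega) (i+2) rfl (by omega)
          (Or.inr (Or.inr (by
            by_cases h2 : i + 2 ≤ tokens.length
            · exact ⟨by omega, by simpa using hne1⟩
            · omega)))
          (acc ++ [(name, pvPOS_TAG_ITEM_NAME)])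
        have hcast : ((i : Int) + 1) + 1 = ((i + 2 : Nat) : Int) := by omega
        rw [hcast, hrec]
        -- B side
        conv_rhs => rw [pvLoopB]
        rw [dif_pos hin, if_pos ⟨hP, hnext⟩, hget]
        simp only [Option.bind_some, hseq, hname]
        cases pvLoopB tokens placeHolderDic (i+2) <;> simp
      · -- else branch: append tokens[i]
        have hbrI : ¬ (tokens[i].1 = pvPLACEHOLDER ∧ (i : Int) + 1 < (tokens.length : Int)) := by
          intro ⟨h1, h2⟩
          exact hbr ⟨h1, by exact_mod_cast h2⟩
        rw [if_neg hbrI]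
        have hok1 : (i + 1 = 0 ∨ tokens.length ≤ i + 1 ∨ ∃ h : (i+1) - 1 < tokens.length, (tokens[(i+1)-1]'h).1 ≠ pvPLACEHOLDER) := by
          by_cases hP : tokens[i].1 = pvPLACEHOLDER
          · have : ¬ (i + 1 < tokens.length) := fun hc => hbr ⟨hP, hc⟩
            omega
          · exact Or.inr (Or.inr ⟨by simpa using hin, by simpa using hP⟩)
        have hrec := IH (tokens.length - (i+1)) (by omega) (i+1) rfl (by omega) hok1
          (acc ++ [tokens[i]])
        have hcast : (i : Int) + 1 = ((i + 1 : Nat) : Int) := by omega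
        rw [hcast, hrec]
        conv_rhs => rw [pvLoopB]
        rw [dif_pos hin, if_neg hbr]
        cases pvLoopB tokens placeHolderDic (i+1) <;> simp
    · -- i = tokens.length: both loops end
      have hdrop : tokens.drop i = [] := List.drop_of_length_le (by omega)
      rw [hdrop, PySem.List.enumerate_nil, pvLoopA, pvLoopB, dif_neg hin]
      simp

-- ===== VERDICT (by name: the statement is the Claim_ definition above) =====
theorem recover_placeholders_spec : Claim_equal_recover_placeholders := by
  intro tokens placeHolderDic _hdom hpre
  unfold Spec_recover_placeholders recover_placeholders recover_placeholders_alt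
  have h := pvLoopAB tokens placeHolderDic hpre tokens.length 0 (by omega) (by omega) (Or.inl rfl) []
  simp only [List.drop_zero, Nat.cast_zero] at h
  rw [h]
  cases pvLoopB tokens placeHolderDic 0 <;> simp
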